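-- pv_equiv track=rewrite | github.com/05saitejaswi/Passing-Stones | passingStones2_0.py | passStones
-- ===== SOURCE A (Python) =====
-- def addArray(array1, array2):
-- 	output = []
-- 	for n in range (0, len(array1)):
-- 		output = output + [array1[n] + array2[n]]
-- 	return output
--
-- def passStones(adjacency, stones):
-- 	addedStones = [0]*len(stones)
-- 	newStones = []
-- 	for n in range (0, len(stones)):
-- 		#check if there are more stones at a location than adjacent edges
-- 		if stones[n] >= sum(adjacency[n]):
-- 			#if there are remove stones to pass out to adjacent vertices
-- 			newStones = newStones + [stones[n] - sum(adjacency[n])]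
-- 			#determines stones to be passed out
-- 			addedStones = addArray(addedStones, adjacency[n])
-- 		else:
-- 			newStones = newStones + [stones[n]]
-- 	return addArray(newStones, addedStones)
-- ===== SOURCE B (Python) =====
-- def passStones(adjacency, stones):
--     k = len(stones)
--     active = [n for n in range(k) if stones[n] >= sum(adjacency[n])]
--     return [(stones[i] - sum(adjacency[i]) if i in active else stones[i])
--             + sum(adjacency[n][i] for n in active) for i in range(k)]
-- ===== Notes on version B (the rewrite author's own statement) =====
-- stated objective: alternative
-- what changed: Replaces A's running addedStones accumulator (updated row-by-row via the addArray helper) with a precomputed active index list and a per-output-index column sum, building the result in one comprehension with no accumulator or helper.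
import Mathlib
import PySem

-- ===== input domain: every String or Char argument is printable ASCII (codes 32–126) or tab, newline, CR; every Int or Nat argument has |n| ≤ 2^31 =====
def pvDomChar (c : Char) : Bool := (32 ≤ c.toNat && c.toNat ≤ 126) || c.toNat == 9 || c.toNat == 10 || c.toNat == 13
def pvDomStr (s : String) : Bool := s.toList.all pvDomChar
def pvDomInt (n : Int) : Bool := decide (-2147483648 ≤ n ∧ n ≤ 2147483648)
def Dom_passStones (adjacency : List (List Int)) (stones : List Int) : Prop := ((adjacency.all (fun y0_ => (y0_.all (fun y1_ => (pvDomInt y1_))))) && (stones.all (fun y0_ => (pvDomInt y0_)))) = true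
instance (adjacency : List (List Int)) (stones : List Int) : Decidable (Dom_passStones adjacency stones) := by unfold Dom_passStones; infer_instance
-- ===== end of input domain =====

-- B replaces A's running addedStones accumulator and addArray helper with a
-- precomputed active index list and per-index column sums (alternative decomposition).

-- ===== PORT A =====
def addArray (array1 array2 : List Int) : List Int :=
  (List.range array1.length).foldl
    (fun output n => output ++ [array1.getD n 0 + array2.getD n 0]) []

def passStones (adjacency : List (List Int)) (stones : List Int) : List Int :=
  let st := (List.range stones.length).foldl
    (fun (p : List Int × List Int) n =>
      if stones.getD n 0 ≥ (adjacency.getD n []).sum then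
        (p.1 ++ [stones.getD n 0 - (adjacency.getD n []).sum],
         addArray p.2 (adjacency.getD n []))
      else
        (p.1 ++ [stones.getD n 0], p.2))
    ([], List.replicate stones.length (0 : Int))
  addArray st.1 st.2

-- ===== PORT B =====
def passStones_alt (adjacency : List (List Int)) (stones : List Int) : List Int :=
  let k := stones.length
  let active := (List.range k).filter (fun n => stones.getD n 0 ≥ (adjacency.getD n []).sum)
  (List.range k).map (fun i =>
    (if i ∈ active then stones.getD i 0 - (adjacency.getD i []).sum else stones.getD i 0)
    + (active.map (fun n => (adjacency.getD n []).getD i 0)).sum)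

-- ===== PRECONDITION & SPEC =====
-- Pre_ excludes exactly the inputs on which A raises an IndexError: a vertex with no
-- adjacency row, or an active vertex whose adjacency row is shorter than stones.
def Pre_passStones (adjacency : List (List Int)) (stones : List Int) : Prop :=
  stones.length ≤ adjacency.length ∧
  ∀ n, n < stones.length → stones.getD n 0 ≥ (adjacency.getD n []).sum →
    stones.length ≤ (adjacency.getD n []).length
instance (adjacency : List (List Int)) (stones : List Int) : Decidable (Pre_passStones adjacency stones) := by unfold Pre_passStones; infer_instance
def pvWitness_passStones : List (List Int) × List Int := ([[0, 1], [1, 0]], [2, 0])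
def Spec_passStones (adjacency : List (List Int)) (stones : List Int) (out : List Int) : Prop := out = passStones_alt adjacency stones
instance (adjacency : List (List Int)) (stones : List Int) (out : List Int) : Decidable (Spec_passStones adjacency stones out) := by unfold Spec_passStones; infer_instance

-- ===== CLAIM (what is proved, stated in full; the proofs are below) =====
def Claim_equal_passStones : Prop := ∀ (adjacency : List (List Int)) (stones : List Int), Dom_passStones adjacency stones → Pre_passStones adjacency stones → Spec_passStones adjacency stones (passStones adjacency stones)

-- ===== LEMMAS AND PROOFS =====

theorem foldl_append_singleton (h : Nat → Int) (l : List Nat) (acc : List Int) :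
    l.foldl (fun out n => out ++ [h n]) acc = acc ++ l.map h := by
  induction l generalizing acc with
  | nil => simp
  | cons x xs ih => simp [List.foldl_cons, ih, List.append_assoc]

theorem addArray_eq_map (a b : List Int) :
    addArray a b = (List.range a.length).map (fun n => a.getD n 0 + b.getD n 0) := by
  unfold addArray
  exact foldl_append_singleton _ _ []

theorem map_range_getD (f : Nat → Int) (k i : Nat) (hi : i < k) :
    ((List.range k).map f).getD i 0 = f i := by
  simp [List.getD_eq_getElem?_getD, List.getElem?_map, List.getElem?_range, hi]

-- the per-step value of newStones
def pvG (adjacency : List (List Int)) (stones : List Int) (n : Nat) : Int :=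
  if stones.getD n 0 ≥ (adjacency.getD n []).sum
  then stones.getD n 0 - (adjacency.getD n []).sum
  else stones.getD n 0

-- loop invariant: after m steps, newStones is the map of pvG over range m and
-- addedStones is the column sum over the active indices among range m
theorem loop_inv (adjacency : List (List Int)) (stones : List Int) (m : Nat) :
    (List.range m).foldl
      (fun (p : List Int × List Int) n =>
        if stones.getD n 0 ≥ (adjacency.getD n []).sum then
          (p.1 ++ [stones.getD n 0 - (adjacency.getD n []).sum],
           addArray p.2 (adjacency.getD n []))
        else
          (p.1 ++ [stones.getD n 0], p.2))
      ([], List.replicate stones.length (0 : Int))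
    = ((List.range m).map (pvG adjacency stones),
       (List.range stones.length).map (fun i =>
         (((List.range m).filter
             (fun n => stones.getD n 0 ≥ (adjacency.getD n []).sum)).map
           (fun n => (adjacency.getD n []).getD i 0)).sum)) := by
  induction m with
  | zero =>
    simp
  | succ m ih =>
    rw [List.range_succ, List.foldl_append, ih, List.foldl_cons, List.foldl_nil,
        List.filter_append, List.filter_singleton]
    by_cases hc : stones.getD m 0 ≥ (adjacency.getD m []).sum
    · simp only [hc, if_pos, decide_true]
      refine Prod.ext ?_ ?_
      · simp only [List.range_succ, List.map_append, List.map_cons, List.map_nil, pvG,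
          if_pos hc]
      · rw [addArray_eq_map]
        simp only [List.length_map, List.length_range]
        refine List.map_congr_left ?_
        intro i hi
        rw [List.mem_range] at hi
        rw [map_range_getD _ _ _ hi]
        simp
    · simp only [hc, if_neg, not_false_iff, decide_false]
      refine Prod.ext ?_ ?_
      · simp only [List.range_succ, List.map_append, List.map_cons, List.map_nil, pvG,
          if_neg hc]
      · simp
theorem passStones_eq (adjacency : List (List Int)) (stones : List Int) :
    passStones adjacency stones = passStones_alt adjacency stones := by
  unfold passStones passStones_alt
  rw [loop_inv, addArray_eq_map]
  simp only [List.length_map, List.length_range]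
  refine List.map_congr_left ?_
  intro i hi
  rw [List.mem_range] at hi
  rw [map_range_getD _ _ _ hi, map_range_getD _ _ _ hi]
  congr 1
  simp [pvG, List.mem_filter, List.mem_range, hi]

-- ===== VERDICT (by name: the statement is the Claim_ definition above) =====
theorem passStones_spec : Claim_equal_passStones := by
  intro adjacency stones _ _
  unfold Spec_passStones
  exact passStones_eq adjacency stones
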